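-- pv_equiv track=rewrite | github.com/AmiSharabi/mcp_text2sql | logs/export_logs_csv.py | _ordered_columns
-- ===== SOURCE A (Python) =====
-- from typing import Any
--
-- CANONICAL_ORDER = [
--     "ts_iso",
--     "_line",
--     "trace_id",
--     "session_id",
--     "request_id",
--     "event_type",
--     "transport",
--     "method",
--     "tool_name",
--     "user_prompt",
--     "sql_preview",
--     "download_mode",
--     "row_count",
--     "agent_think_ms",
--     "sql_exec_ms",
--     "total_ms",
--     "error",
-- ]
--
-- def _ordered_columns(records: list[dict[str, Any]]) -> list[str]:
--     columns = set()
--     for row in records: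
--         columns.update(row.keys())
--
--     ordered = list(CANONICAL_ORDER)
--     for col in sorted(columns):
--         if col not in ordered:
--             ordered.append(col)
--     return ordered
-- ===== SOURCE B (Python) =====
-- CANONICAL_ORDER = [
--     "ts_iso",
--     "_line",
--     "trace_id",
--     "session_id",
--     "request_id",
--     "event_type",
--     "transport",
--     "method",
--     "tool_name",
--     "user_prompt",
--     "sql_preview",
--     "download_mode",
--     "row_count",
--     "agent_think_ms",
--     "sql_exec_ms",
--     "total_ms",
--     "error",
-- ]
--
-- def _ordered_columns(records):
--     index = {col: i for i, col in enumerate(CANONICAL_ORDER)}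
--     sentinel = len(CANONICAL_ORDER)
--     merged = set(index)
--     for row in records:
--         merged.update(row)
--     return sorted(merged, key=lambda c: (index.get(c, sentinel), c))
-- ===== Notes on version B (the rewrite author's own statement) =====
-- stated objective: faster
-- what changed: A copies the canonical list and runs an append-if-absent loop over the sorted full column set (a linear membership scan of the growing result per column); B builds a {name: position} index map over CANONICAL_ORDER, merges its keys with all record keys into one set, and produces the result with a SINGLE keyed sort using the composite key (index.get(c, sentinel), c), so the two-phase copy-then-append loop disappears.
import Mathlib
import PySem

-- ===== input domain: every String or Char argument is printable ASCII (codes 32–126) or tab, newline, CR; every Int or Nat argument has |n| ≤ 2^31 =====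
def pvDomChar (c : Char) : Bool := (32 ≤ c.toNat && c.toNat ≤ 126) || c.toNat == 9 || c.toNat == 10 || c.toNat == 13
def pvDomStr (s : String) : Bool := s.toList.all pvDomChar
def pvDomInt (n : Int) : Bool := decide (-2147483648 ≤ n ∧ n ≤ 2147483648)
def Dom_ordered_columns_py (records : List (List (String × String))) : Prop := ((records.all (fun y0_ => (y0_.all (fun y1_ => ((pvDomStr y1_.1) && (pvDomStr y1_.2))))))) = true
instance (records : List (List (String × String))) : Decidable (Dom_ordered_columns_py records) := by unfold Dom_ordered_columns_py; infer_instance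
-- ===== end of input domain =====

-- B replaces A's two-phase 'copy canonical list, then append-if-absent the sorted extras'
-- by ONE keyed sort over the merged column set, ordered by a composite key
-- (canonical index from an index map, sentinel for extras, then name) (objective: alternative).

-- the module constant CANONICAL_ORDER (shared context of both programs)
def canonicalOrder : List String :=
  ["ts_iso", "_line", "trace_id", "session_id", "request_id", "event_type",
   "transport", "method", "tool_name", "user_prompt", "sql_preview",
   "download_mode", "row_count", "agent_think_ms", "sql_exec_ms", "total_ms", "error"]

-- ===== PORT A =====
def ordered_columns_py (records : List (List (String × String))) : List String :=
  -- columns = set(); for row in records: columns.update(row.keys())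
  let columns : PySem.Set String :=
    records.foldl (fun s row => PySem.Set.update s (row.map (·.1))) PySem.Set.empty
  -- ordered = list(CANONICAL_ORDER); for col in sorted(columns): if col not in ordered: ordered.append(col)
  (PySem.List.sorted columns (fun x => x)).foldl
    (fun ordered col => if ordered.contains col then ordered else ordered ++ [col])
    canonicalOrder

-- ===== PORT B =====
def ordered_columns_py_alt (records : List (List (String × String))) : List String :=
  -- index = {col: i for i, col in enumerate(CANONICAL_ORDER)}
  let index : PySem.Dict String Int :=
    PySem.Dict.ofList ((PySem.List.enumerate canonicalOrder).map (fun p => (p.2, p.1)))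
  -- sentinel = len(CANONICAL_ORDER)
  let sentinel : Int := PySem.List.len canonicalOrder
  -- merged = set(index); for row in records: merged.update(row)
  let merged : PySem.Set String :=
    records.foldl (fun s row => PySem.Set.update s (row.map (·.1)))
      (PySem.Set.ofList (PySem.Dict.keys index))
  -- return sorted(merged, key=lambda c: (index.get(c, sentinel), c))
  PySem.List.sorted2 merged (fun c => PySem.Dict.getD index c sentinel) (fun c => c)

-- ===== PRECONDITION & SPEC =====
def Spec_ordered_columns_py (records : List (List (String × String))) (out : List String) : Prop := out = ordered_columns_py_alt records
instance (records : List (List (String × String))) (out : List String) : Decidable (Spec_ordered_columns_py records out) := by unfold Spec_ordered_columns_py; infer_instance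

-- ===== CLAIM (what is proved, stated in full; the proofs are below) =====
def Claim_equal_ordered_columns_py : Prop := ∀ (records : List (List (String × String))), Dom_ordered_columns_py records → Spec_ordered_columns_py records (ordered_columns_py records)

-- ===== LEMMAS AND PROOFS =====

-- abbreviations for the proof (not used by the ports)
def canIndex : PySem.Dict String Int :=
  PySem.Dict.ofList ((PySem.List.enumerate canonicalOrder).map (fun p => (p.2, p.1)))

def lexKey (c : String) : Lex (Int × String) :=
  toLex (PySem.Dict.getD canIndex c 17, c)

theorem foldl_flatMap_nested {α β γ : Type} (f : β → List α) (g : γ → α → γ)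
    (l : List β) : ∀ s : γ,
    (l.flatMap f).foldl g s = l.foldl (fun s row => (f row).foldl g s) s := by
  induction l with
  | nil => intro s; rfl
  | cons r t ih =>
    intro s
    rw [List.flatMap_cons, List.foldl_append, List.foldl_cons]
    exact ih _

-- A's set-building fold over the rows is set(flattened keys)
theorem columns_eq_ofList_flatMap (records : List (List (String × String))) :
    records.foldl (fun s row => PySem.Set.update s (row.map (·.1))) PySem.Set.empty
      = PySem.Set.ofList (records.flatMap (fun row => row.map (·.1))) := by
  rw [PySem.Set.ofList_eq_foldl, foldl_flatMap_nested]
  rfl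

-- B's merged-set fold is set(CANONICAL_ORDER).update(flattened keys)
theorem merged_eq_update (records : List (List (String × String))) (base : PySem.Set String) :
    records.foldl (fun s row => PySem.Set.update s (row.map (·.1))) base
      = PySem.Set.update base (records.flatMap (fun row => row.map (·.1))) := by
  unfold PySem.Set.update
  rw [foldl_flatMap_nested]

-- A's append-if-absent loop over a duplicate-free list is accumulator ++ filter
theorem foldl_append_if_not_contains (l : List String) (hl : l.Nodup) :
    ∀ acc : List String,
      l.foldl (fun ordered col => if ordered.contains col then ordered else ordered ++ [col]) acc
        = acc ++ l.filter (fun c => !acc.contains c) := by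
  induction l with
  | nil => intro acc; simp
  | cons c t ih =>
    intro acc
    rcases List.nodup_cons.mp hl with ⟨hct, ht⟩
    rw [List.foldl_cons]
    by_cases hc : c ∈ acc
    · have hstep : (if acc.contains c then acc else acc ++ [c]) = acc := by simp [hc]
      rw [hstep, ih ht acc, List.filter_cons]
      simp [hc]
    · have hstep : (if acc.contains c then acc else acc ++ [c]) = acc ++ [c] := by simp [hc]
      have hfilt : t.filter (fun x => !(acc ++ [c]).contains x)
          = t.filter (fun x => !acc.contains x) := by
        apply List.filter_congr
        intro x hx
        have hxc : x ≠ c := fun h => hct (h ▸ hx)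
        simp [hxc]
      rw [hstep, ih ht (acc ++ [c]), hfilt, List.filter_cons, List.append_assoc]
      simp [hc]

-- sorted2 with keys (k1, id) is sorted with the lexicographic key
theorem sorted2_eq_sorted_toLex (k1 : String → Int) (xs : List String) :
    PySem.List.sorted2 xs k1 (fun c => c) false
      = PySem.List.sorted xs (fun c => toLex (k1 c, c)) false := by
  unfold PySem.List.sorted2 PySem.List.sorted
  simp only [if_neg Bool.false_ne_true]
  congr 1
  funext acc x
  congr 1
  funext a b
  by_cases h1 : k1 a < k1 b
  · simp [Prod.Lex.lt_iff, h1]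
  · by_cases h2 : k1 b < k1 a
    · have hne : ¬ k1 a = k1 b := by omega
      simp [Prod.Lex.lt_iff, h1, h2, hne]
    · have heq : k1 a = k1 b := by omega
      simp [Prod.Lex.lt_iff, heq]

-- the dict lookup of a non-canonical column falls back to the sentinel
theorem getD_of_not_canonical (e : String) (he : e ∉ canonicalOrder) :
    PySem.Dict.getD canIndex e 17 = 17 := by
  apply PySem.Dict.getD_of_get?_eq_none
  rw [PySem.Dict.get?_eq_none_iff_not_mem_keys]
  have hk : PySem.Dict.keys canIndex = canonicalOrder := by decide
  rw [hk]
  exact he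

-- canonical columns have lexKey below any sentinel key
theorem canonical_getD_lt (a : String) (ha : a ∈ canonicalOrder) :
    PySem.Dict.getD canIndex a 17 < 17 := by
  fin_cases ha <;> decide

theorem ports_agree (records : List (List (String × String))) :
    ordered_columns_py records = ordered_columns_py_alt records := by
  simp only [ordered_columns_py, ordered_columns_py_alt]
  set keys := records.flatMap (fun row => row.map (·.1)) with hkeys
  -- the common column pool
  have hbase : PySem.Set.ofList (PySem.Dict.keys
      (PySem.Dict.ofList ((PySem.List.enumerate canonicalOrder).map (fun p => (p.2, p.1)))))
      = canonicalOrder := by decide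
  rw [columns_eq_ofList_flatMap, merged_eq_update, hbase]
  -- target shape: canonicalOrder ++ (sorted extras)
  set F : List String :=
    (PySem.List.sorted (PySem.Set.ofList keys) (fun x => x)).filter
      (fun c => !canonicalOrder.contains c) with hF
  -- A's side
  have hnd : (PySem.List.sorted (PySem.Set.ofList keys) (fun x => x)).Nodup :=
    (PySem.List.sorted_perm _ _ _).nodup_iff.mpr (PySem.Set.nodup_ofList keys)
  have hA : (PySem.List.sorted (PySem.Set.ofList keys) (fun x => x)).foldl
      (fun ordered col => if ordered.contains col then ordered else ordered ++ [col])
      canonicalOrder = canonicalOrder ++ F := by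
    rw [foldl_append_if_not_contains _ hnd canonicalOrder]
  rw [hA]
  -- B's side: one keyed sort of the merged pool returns exactly that list
  have hlen : PySem.List.len canonicalOrder = (17 : Int) := by decide
  rw [hlen]
  have hB : PySem.List.sorted2 (PySem.Set.update canonicalOrder keys)
      (fun c => PySem.Dict.getD canIndex c 17) (fun c => c) false
      = PySem.List.sorted (PySem.Set.update canonicalOrder keys) lexKey false := by
    rw [sorted2_eq_sorted_toLex]
    rfl
  show _ = PySem.List.sorted2 (PySem.Set.update canonicalOrder keys)
      (fun c => PySem.Dict.getD canIndex c 17) (fun c => c) false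
  rw [hB]
  apply Eq.symm
  apply PySem.List.sorted_eq_of_perm_of_pairwise_lt
  · -- permutation: merged pool ~ canonicalOrder ++ F
    rw [PySem.Set.update_eq_append_filter]
    apply List.Perm.append_left
    simp only [PySem.Set.contains_eq_listContains]
    exact (PySem.List.sorted_perm (PySem.Set.ofList keys) (fun x => x) false).filter _
  · -- the target list is strictly increasing under lexKey
    rw [List.pairwise_append]
    refine ⟨?_, ?_, ?_⟩
    · -- canonical part: concrete, decide
      decide
    · -- extras: same sentinel first component, strictly increasing names
      have hp : F.Pairwise (· < ·) :=
        (PySem.List.sorted_ofList_pairwise_lt keys).filter _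
      refine hp.imp_of_mem ?_
      intro a b ha hb hab
      have hna : a ∉ canonicalOrder := by
        have := List.of_mem_filter ha; simpa using this
      have hnb : b ∉ canonicalOrder := by
        have := List.of_mem_filter hb; simpa using this
      show lexKey a < lexKey b
      unfold lexKey
      rw [Prod.Lex.lt_iff]
      right
      exact ⟨by simp [getD_of_not_canonical a hna, getD_of_not_canonical b hnb], hab⟩
    · -- every canonical column precedes every extra
      intro a ha b hb
      have hnb : b ∉ canonicalOrder := by
        have := List.of_mem_filter hb; simpa using this
      show lexKey a < lexKey b
      unfold lexKey
      rw [Prod.Lex.lt_iff]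
      left
      rw [getD_of_not_canonical b hnb]
      exact canonical_getD_lt a ha

-- ===== VERDICT (by name: the statement is the Claim_ definition above) =====
theorem ordered_columns_py_spec : Claim_equal_ordered_columns_py := by
  intro records _
  unfold Spec_ordered_columns_py
  exact ports_agree records
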